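-- pv_equiv track=rewrite | github.com/ZouJoshua/dl_project | nlp_tasks/text_classification/browser_video/browser_category_train.py | _label_count
-- ===== SOURCE A (Python) =====
-- def _label_count(label_list):
--     label_count = dict()
--     for i in label_list:
--         if i in label_count:
--             label_count[i] += 1
--         else:
--             label_count[i] = 1
--     return label_count
-- ===== SOURCE B (Python) =====
-- def _label_count(label_list):
--     return {lbl: label_list.count(lbl) for lbl in set(label_list)}
-- ===== Notes on version B (the rewrite author's own statement) =====
-- stated objective: idiomatic
-- what changed: Replaces A's single accumulating dict pass with a dict comprehension over the distinct labels (set) that re-scans the list with list.count for each key.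
import Mathlib
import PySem

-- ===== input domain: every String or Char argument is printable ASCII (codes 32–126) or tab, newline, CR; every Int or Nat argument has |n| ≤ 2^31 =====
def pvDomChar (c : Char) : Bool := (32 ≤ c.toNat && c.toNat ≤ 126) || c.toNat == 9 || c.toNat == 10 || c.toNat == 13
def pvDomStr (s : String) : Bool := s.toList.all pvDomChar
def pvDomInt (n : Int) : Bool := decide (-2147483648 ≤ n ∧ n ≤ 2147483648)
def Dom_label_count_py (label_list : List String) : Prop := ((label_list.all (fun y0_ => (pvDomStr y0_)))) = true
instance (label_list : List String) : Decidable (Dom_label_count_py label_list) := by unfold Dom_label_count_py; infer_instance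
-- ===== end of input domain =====

-- B builds the counts as a dict comprehension over the distinct labels (idiomatic); value equality of the
-- returned dict is proved (key order: first occurrence in the Lean ports; Python dicts are compared as dicts).

-- ===== PORT A =====
-- one pass, accumulating dict: if i in d: d[i] += 1 else d[i] = 1
def label_count_py (label_list : List String) : List (String × Int) :=
  (label_list.foldl
    (fun d i => if d.contains i then d.insert i (d.getD i 0 + 1) else d.insert i 1)
    (PySem.Dict.empty : PySem.Dict String Int)).items

-- ===== PORT B =====
-- {lbl: label_list.count(lbl) for lbl in set(label_list)}
def label_count_py_alt (label_list : List String) : List (String × Int) :=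
  (PySem.Set.ofList label_list).map (fun lbl => (lbl, (PySem.List.count label_list lbl : Int)))

-- ===== PRECONDITION & SPEC =====
def Spec_label_count_py (label_list : List String) (out : List (String × Int)) : Prop := out = label_count_py_alt label_list
instance (label_list : List String) (out : List (String × Int)) : Decidable (Spec_label_count_py label_list out) := by unfold Spec_label_count_py; infer_instance

-- ===== CLAIM (what is proved, stated in full; the proofs are below) =====
def Claim_equal_label_count_py : Prop := ∀ (label_list : List String), Dom_label_count_py label_list → Spec_label_count_py label_list (label_count_py label_list)

-- ===== LEMMAS AND PROOFS =====

-- A's branched loop step is, in both branches, an insert of the incremented count.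
theorem label_count_step_eq (d : PySem.Dict String Int) (i : String) :
    (if d.contains i then d.insert i (d.getD i 0 + 1) else d.insert i 1)
      = d.insert i (d.getD i 0 + 1) := by
  by_cases h : d.contains i = true
  · simp [h]
  · have h' : d.contains i = false := by simpa using h
    simp [h, PySem.Dict.getD_of_not_contains _ _ h']

theorem label_count_py_spec : Claim_equal_label_count_py := by
  intro label_list _
  unfold Spec_label_count_py label_count_py label_count_py_alt
  have hstep : (label_list.foldl
      (fun d i => if d.contains i then d.insert i (d.getD i 0 + 1) else d.insert i 1)
      (PySem.Dict.empty : PySem.Dict String Int))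
      = label_list.foldl (fun d i => d.insert i (d.getD i 0 + 1)) PySem.Dict.empty := by
    exact PySem.List.foldl_congr_mem _ _ _ _ (fun d i _ => label_count_step_eq d i)
  rw [hstep, PySem.Dict.foldl_insert_getD_add_one_eq_counter, PySem.Dict.items_counter]
  simp [PySem.List.count_eq]
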